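-- pv_equiv track=rewrite | github.com/Channing-Zeng/Reporting_Suite | tools/make_exons.py | parse_ensembl_chrom
-- ===== SOURCE A (Python) =====
-- def parse_ensembl_chrom(chrom):
--     CHROMS = ['Y', 'X', 'MT']
--     for i in range(22, 0, -1):
--         CHROMS.append(str(i))
--
--     for c in CHROMS:
--         if chrom.startswith(c):
--             if c == 'MT':
--                 return 'chrM'
--             return 'chr' + c
--
--     return None
-- ===== SOURCE B (Python) =====
-- def parse_ensembl_chrom(chrom):
--     if chrom.startswith('MT'):
--         return 'chrM'
--     if chrom.startswith('X'):
--         return 'chrX'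
--     if chrom.startswith('Y'):
--         return 'chrY'
--     if not chrom[:1].isdigit() or chrom.startswith('0'):
--         return None
--     if len(chrom) >= 2 and chrom[1:2].isdigit() and (chrom[0] == '1' or (chrom[0] == '2' and chrom[1] <= '2')):
--         return 'chr' + chrom[:2]
--     return 'chr' + chrom[0]
-- ===== Notes on version B (the rewrite author's own statement) =====
-- stated objective: simpler
-- what changed: Replaces A's construction of a 25-entry prefix list and its first-match scan by direct closed-form checks on the first one or two characters (MT/X/Y, then a two-digit 10-22 test, then a single nonzero digit).
import Mathlib
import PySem

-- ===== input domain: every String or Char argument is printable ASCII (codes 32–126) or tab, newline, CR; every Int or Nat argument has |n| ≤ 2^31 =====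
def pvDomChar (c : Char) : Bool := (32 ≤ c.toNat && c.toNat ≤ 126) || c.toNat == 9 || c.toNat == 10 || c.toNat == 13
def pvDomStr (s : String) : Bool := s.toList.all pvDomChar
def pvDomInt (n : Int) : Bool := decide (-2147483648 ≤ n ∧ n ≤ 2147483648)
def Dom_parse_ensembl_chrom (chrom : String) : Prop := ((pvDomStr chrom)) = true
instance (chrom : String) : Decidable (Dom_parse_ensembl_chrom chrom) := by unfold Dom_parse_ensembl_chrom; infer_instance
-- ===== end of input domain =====

-- B replaces A's descending 22..1 startswith loop by direct closed-form checks on the first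
-- two characters (objective: simpler); equal return value on every string.

-- ===== PORT A =====
-- CHROMS = ['Y','X','MT']; for i in range(22, 0, -1): CHROMS.append(str(i))
def pvChromsA : List String :=
  (PySem.List.pyRange 22 0 (-1)).foldl (fun acc i => acc ++ [PySem.Int.toStr i]) ["Y", "X", "MT"]

-- for c in CHROMS: if chrom.startswith(c): …  (first match wins)
def pvFindA (chrom : String) : List String → Option String
  | [] => none
  | c :: rest =>
    if PySem.Str.startswith chrom c then
      (if c = "MT" then some "chrM" else some ("chr" ++ c))
    else pvFindA chrom rest

def parse_ensembl_chrom (chrom : String) : Option String := pvFindA chrom pvChromsA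

-- ===== PORT B =====
-- transliteration of Source B; works on the code points (exact: every Str primitive is the
-- Chars one on chrom.toList). The pyGetD defaults are never reached: chrom[0]/chrom[1]
-- are only read under the guards len ≥ 1 (from chrom[:1].isdigit()) resp. len ≥ 2.
def parse_ensembl_chrom_alt (chrom : String) : Option String :=
  let cs := chrom.toList
  if PySem.Chars.startswith cs ['M', 'T'] then some "chrM"
  else if PySem.Chars.startswith cs ['X'] then some "chrX"
  else if PySem.Chars.startswith cs ['Y'] then some "chrY"
  else if !(PySem.Chars.strIsdigit (PySem.List.slice cs none (some 1)))
          || PySem.Chars.startswith cs ['0'] then none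
  else if decide (2 ≤ cs.length) && PySem.Chars.strIsdigit (PySem.List.slice cs (some 1) (some 2))
          && (PySem.List.pyGetD cs 0 ' ' == '1'
              || (PySem.List.pyGetD cs 0 ' ' == '2' && decide (PySem.List.pyGetD cs 1 ' ' ≤ '2'))) then
    some (String.ofList ('c' :: 'h' :: 'r' :: PySem.List.slice cs none (some 2)))
  else some (String.ofList ['c', 'h', 'r', PySem.List.pyGetD cs 0 ' '])

-- ===== PRECONDITION & SPEC =====
def Spec_parse_ensembl_chrom (chrom : String) (out : Option String) : Prop := out = parse_ensembl_chrom_alt chrom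
instance (chrom : String) (out : Option String) : Decidable (Spec_parse_ensembl_chrom chrom out) := by unfold Spec_parse_ensembl_chrom; infer_instance

-- ===== CLAIM (what is proved, stated in full; the proofs are below) =====
def Claim_equal_parse_ensembl_chrom : Prop := ∀ (chrom : String), Dom_parse_ensembl_chrom chrom → Spec_parse_ensembl_chrom chrom (parse_ensembl_chrom chrom)

-- ===== LEMMAS AND PROOFS =====

theorem pvChromsA_eq : pvChromsA = ["Y","X","MT","22","21","20","19","18","17","16","15","14","13","12","11","10","9","8","7","6","5","4","3","2","1"] := by decide

theorem pv_isdigit_cases (d : Char) (h : PySem.Chars.isdigit d = true) :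
    d='0'∨d='1'∨d='2'∨d='3'∨d='4'∨d='5'∨d='6'∨d='7'∨d='8'∨d='9' := by
  simp [PySem.Chars.isdigit] at h
  obtain ⟨h1, h2⟩ := h
  rw [Char.le_def, UInt32.le_iff_toNat_le] at h1 h2
  have e0 : ('0':Char).val.toNat = 48 := rfl
  have e9 : ('9':Char).val.toNat = 57 := rfl
  rw [e0] at h1; rw [e9] at h2
  have hv : d.val.toNat = 48 ∨ d.val.toNat = 49 ∨ d.val.toNat = 50 ∨ d.val.toNat = 51 ∨ d.val.toNat = 52 ∨ d.val.toNat = 53 ∨ d.val.toNat = 54 ∨ d.val.toNat = 55 ∨ d.val.toNat = 56 ∨ d.val.toNat = 57 := by omega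
  rcases hv with h|h|h|h|h|h|h|h|h|h <;>
    [ (have : d = '0' := Char.ext (UInt32.toNat_inj.mp h));
      (have : d = '1' := Char.ext (UInt32.toNat_inj.mp h));
      (have : d = '2' := Char.ext (UInt32.toNat_inj.mp h));
      (have : d = '3' := Char.ext (UInt32.toNat_inj.mp h));
      (have : d = '4' := Char.ext (UInt32.toNat_inj.mp h));
      (have : d = '5' := Char.ext (UInt32.toNat_inj.mp h));
      (have : d = '6' := Char.ext (UInt32.toNat_inj.mp h));
      (have : d = '7' := Char.ext (UInt32.toNat_inj.mp h));
      (have : d = '8' := Char.ext (UInt32.toNat_inj.mp h));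
      (have : d = '9' := Char.ext (UInt32.toNat_inj.mp h))] <;> tauto

theorem pv_main (chrom : String) : parse_ensembl_chrom chrom = parse_ensembl_chrom_alt chrom := by
  rcases hl : chrom.toList with _ | ⟨c, _ | ⟨d, r⟩⟩ <;>
    simp only [parse_ensembl_chrom, parse_ensembl_chrom_alt, pvChromsA_eq, pvFindA,
      PySem.Str.startswith_eq, hl]
  · simp [PySem.Chars.startswith, List.isPrefixOf, PySem.List.slice, PySem.Chars.strIsdigit]
  · simp [PySem.Chars.startswith, List.isPrefixOf, PySem.List.slice, PySem.Chars.strIsdigit]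
    by_cases hY : 'Y' = c
    · subst hY; decide
    by_cases hX : 'X' = c
    · subst hX; decide
    by_cases h9 : '9' = c
    · subst h9; decide
    by_cases h8 : '8' = c
    · subst h8; decide
    by_cases h7 : '7' = c
    · subst h7; decide
    by_cases h6 : '6' = c
    · subst h6; decide
    by_cases h5 : '5' = c
    · subst h5; decide
    by_cases h4 : '4' = c
    · subst h4; decide
    by_cases h3 : '3' = c
    · subst h3; decide
    by_cases h2 : '2' = c
    · subst h2; decide
    by_cases h1 : '1' = c
    · subst h1; decide
    by_cases h0 : '0' = c
    · subst h0; decide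
    simp only [if_neg hY, if_neg hX, if_neg h9, if_neg h8, if_neg h7, if_neg h6, if_neg h5,
      if_neg h4, if_neg h3, if_neg h2, if_neg h1]
    have hD : PySem.Chars.isdigit c = false := by
      by_contra hD'
      simp only [Bool.not_eq_false] at hD'
      rcases pv_isdigit_cases c hD' with h|h|h|h|h|h|h|h|h|h <;> subst h <;> tauto
    rw [if_pos (Or.inl hD)]
  · simp [PySem.Chars.startswith, List.isPrefixOf, PySem.List.slice, PySem.Chars.strIsdigit,
      PySem.List.pyGetD_ofNat', List.getD]
    by_cases hM : 'M' = c
    · subst hM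
      by_cases hT : 'T' = d
      · subst hT; decide
      · simp [hT, PySem.Chars.isdigit]
    by_cases hX : 'X' = c
    · subst hX; simp
    by_cases hY : 'Y' = c
    · subst hY; simp
    by_cases h0 : '0' = c
    · subst h0; simp [PySem.Chars.isdigit]
    by_cases h3 : '3' = c
    · subst h3; simp [PySem.Chars.isdigit]
    by_cases h4 : '4' = c
    · subst h4; simp [PySem.Chars.isdigit]
    by_cases h5 : '5' = c
    · subst h5; simp [PySem.Chars.isdigit]
    by_cases h6 : '6' = c
    · subst h6; simp [PySem.Chars.isdigit]
    by_cases h7 : '7' = c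
    · subst h7; simp [PySem.Chars.isdigit]
    by_cases h8 : '8' = c
    · subst h8; simp [PySem.Chars.isdigit]
    by_cases h9 : '9' = c
    · subst h9; simp [PySem.Chars.isdigit]
    by_cases h1 : '1' = c
    · subst h1
      by_cases hdig : PySem.Chars.isdigit d = true
      · rcases pv_isdigit_cases d hdig with h|h|h|h|h|h|h|h|h|h <;> subst h <;> decide
      · have hd' : PySem.Chars.isdigit d = false := by simpa using hdig
        have n0 : ¬ ('0' = d) := fun h => absurd (h ▸ hd') (by decide)
        have n1 : ¬ ('1' = d) := fun h => absurd (h ▸ hd') (by decide)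
        have n2 : ¬ ('2' = d) := fun h => absurd (h ▸ hd') (by decide)
        have n3 : ¬ ('3' = d) := fun h => absurd (h ▸ hd') (by decide)
        have n4 : ¬ ('4' = d) := fun h => absurd (h ▸ hd') (by decide)
        have n5 : ¬ ('5' = d) := fun h => absurd (h ▸ hd') (by decide)
        have n6 : ¬ ('6' = d) := fun h => absurd (h ▸ hd') (by decide)
        have n7 : ¬ ('7' = d) := fun h => absurd (h ▸ hd') (by decide)
        have n8 : ¬ ('8' = d) := fun h => absurd (h ▸ hd') (by decide)
        have n9 : ¬ ('9' = d) := fun h => absurd (h ▸ hd') (by decide)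
        simp [hd', n0, n1, n2, n3, n4, n5, n6, n7, n8, n9]; decide
    by_cases h2 : '2' = c
    · subst h2
      by_cases hdig : PySem.Chars.isdigit d = true
      · rcases pv_isdigit_cases d hdig with h|h|h|h|h|h|h|h|h|h <;> subst h <;> decide
      · have hd' : PySem.Chars.isdigit d = false := by simpa using hdig
        have n0 : ¬ ('0' = d) := fun h => absurd (h ▸ hd') (by decide)
        have n1 : ¬ ('1' = d) := fun h => absurd (h ▸ hd') (by decide)
        have n2 : ¬ ('2' = d) := fun h => absurd (h ▸ hd') (by decide)
        simp [hd', n0, n1, n2]; decide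
    · have hD : PySem.Chars.isdigit c = false := by
        by_contra hD'
        simp only [Bool.not_eq_false] at hD'
        rcases pv_isdigit_cases c hD' with h|h|h|h|h|h|h|h|h|h <;> subst h <;> tauto
      simp [hM, hX, hY, h0, h1, h2, h3, h4, h5, h6, h7, h8, h9, hD]

-- ===== VERDICT (by name: the statement is the Claim_ definition above) =====
theorem parse_ensembl_chrom_spec : Claim_equal_parse_ensembl_chrom := by
  intro chrom _
  exact pv_main chrom
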